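-- pv_equiv track=rewrite | github.com/CodeFarmer2024/avatar-the-last-airbender | scripts/build_docs.py | normalize_block
-- ===== SOURCE A (Python) =====
-- def normalize_block(text: str) -> str:
--     # Trim trailing whitespace on each line and remove excessive leading/trailing blank lines
--     text = text.replace("\t", "    ").replace("\x0c", "\n")
--     lines = [ln.rstrip().lstrip(" ") for ln in text.split("\n")]
--     while lines and lines[0].strip() == "":
--         lines.pop(0)
--     while lines and lines[-1].strip() == "":
--         lines.pop()
--     # Collapse consecutive blank lines to a single blank line
--     compact = []
--     blank = False
--     for ln in lines:
--         if ln.strip() == "":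
--             if not blank:
--                 compact.append("")
--             blank = True
--         else:
--             compact.append(ln)
--             blank = False
--     # Remove common leading indentation
--     non_empty = [ln for ln in compact if ln.strip() != ""]
--     if not non_empty:
--         return ""
--     min_indent = min(len(ln) - len(ln.lstrip(" ")) for ln in non_empty)
--     if min_indent > 0:
--         compact = [ln[min_indent:] if len(ln) >= min_indent else "" for ln in compact]
--     return "\n".join(compact)
-- ===== SOURCE B (Python) =====
-- def normalize_block(text: str) -> str:
--     # Single forward pass: a pending-blank flag collapses blank runs and
--     # drops leading/trailing blank lines; the dedent step of the original
--     # is dead (leading spaces are already stripped) and is omitted.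
--     text = text.replace("\t", "    ").replace("\x0c", "\n")
--     out = []
--     pending = False
--     for raw in text.split("\n"):
--         ln = raw.rstrip()
--         if not ln:
--             pending = bool(out)
--         else:
--             if pending:
--                 out.append("")
--                 pending = False
--             out.append(ln.lstrip(" "))
--     return "\n".join(out)
-- ===== Notes on version B (the rewrite author's own statement) =====
-- stated objective: simpler
-- what changed: Replaces A's two while-pop trim loops, separate blank-collapsing pass and dead min-indent dedent computation by a single forward fold with a pending-blank flag that drops leading/trailing blanks and collapses interior blank runs.
import Mathlib
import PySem

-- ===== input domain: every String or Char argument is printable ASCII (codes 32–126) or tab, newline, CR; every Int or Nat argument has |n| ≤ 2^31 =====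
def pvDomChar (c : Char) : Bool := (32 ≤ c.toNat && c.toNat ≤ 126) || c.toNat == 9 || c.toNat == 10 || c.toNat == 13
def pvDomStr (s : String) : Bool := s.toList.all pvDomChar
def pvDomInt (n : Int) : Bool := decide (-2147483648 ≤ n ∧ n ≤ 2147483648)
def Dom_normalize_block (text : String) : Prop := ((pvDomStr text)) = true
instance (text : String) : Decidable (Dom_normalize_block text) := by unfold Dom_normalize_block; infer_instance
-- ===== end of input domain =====

-- B rewrites A's four passes (two while-pop trims, blank-run collapse, dead dedent)
-- as one forward fold with a pending-blank flag; objective: simpler.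

-- ===== PORT A =====
-- ln.rstrip().lstrip(" ")  (lstrip(" ") drops exactly leading ' ' characters — exact)
def procLine (ln : List Char) : List Char :=
  (PySem.Chars.rstrip ln).dropWhile (fun c => c == ' ')

-- while lines and lines[0].strip() == "": lines.pop(0)
def popLeadA : List (List Char) → List (List Char)
  | [] => []
  | l :: ls => if PySem.Chars.strip l = [] then popLeadA ls else l :: ls

-- while lines and lines[-1].strip() == "": lines.pop()
def popTrailA (ls : List (List Char)) : List (List Char) :=
  if h : ls = [] then ls
  else if PySem.Chars.strip (ls.getLast h) = [] then popTrailA ls.dropLast else ls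
  termination_by ls.length
  decreasing_by
    have := List.length_pos_of_ne_nil h
    simp [List.length_dropLast]; omega

-- the body of A's collapse loop (state: (compact, blank))
def aStep (acc : List (List Char) × Bool) (ln : List Char) : List (List Char) × Bool :=
  if PySem.Chars.strip ln = [] then
    ((if acc.2 then acc.1 else acc.1 ++ [([] : List Char)]), true)
  else (acc.1 ++ [ln], false)

def normalize_block (text : String) : String :=
  let t := (PySem.Str.replace (PySem.Str.replace text "\t" "    ") "\x0c" "\n").toList
  let lines0 := (PySem.Chars.splitOn t ['\n']).map procLine
  let lines := popTrailA (popLeadA lines0)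
  let compact := (lines.foldl aStep (([] : List (List Char)), false)).1
  let nonEmpty := compact.filter (fun ln => !(PySem.Chars.strip ln).isEmpty)
  if nonEmpty = [] then ""
  else
    -- min(len(ln) - len(ln.lstrip(" ")) for ln in non_empty); non_empty ≠ [] here
    let minIndent : Int :=
      (PySem.List.min? (nonEmpty.map (fun ln =>
        ((ln.length : Int) - ((ln.dropWhile (fun c => c == ' ')).length : Int)))) id).getD 0
    let compact2 := if minIndent > 0 then
        compact.map (fun ln =>
          if minIndent ≤ (ln.length : Int) then PySem.List.slice ln (some minIndent) none else [])
      else compact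
    String.ofList (PySem.Chars.join ['\n'] compact2)

-- ===== PORT B =====
-- the body of B's single forward pass (state: (out, pending))
def bStep (acc : List (List Char) × Bool) (raw : List Char) : List (List Char) × Bool :=
  let ln := PySem.Chars.rstrip raw
  if ln = [] then (acc.1, !acc.1.isEmpty)
  else if acc.2 then (acc.1 ++ [([] : List Char), ln.dropWhile (fun c => c == ' ')], false)
  else (acc.1 ++ [ln.dropWhile (fun c => c == ' ')], false)

def normalize_block_alt (text : String) : String :=
  let t := (PySem.Str.replace (PySem.Str.replace text "\t" "    ") "\x0c" "\n").toList
  let st := (PySem.Chars.splitOn t ['\n']).foldl bStep (([] : List (List Char)), false)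
  String.ofList (PySem.Chars.join ['\n'] st.1)

-- ===== PRECONDITION & SPEC =====
def Spec_normalize_block (text : String) (out : String) : Prop := out = normalize_block_alt text
instance (text : String) (out : String) : Decidable (Spec_normalize_block text out) := by unfold Spec_normalize_block; infer_instance

-- ===== CLAIM (what is proved, stated in full; the proofs are below) =====
def Claim_equal_normalize_block : Prop := ∀ (text : String), Dom_normalize_block text → Spec_normalize_block text (normalize_block text)

-- ===== LEMMAS AND PROOFS =====

-- proof-only pure helpers
def cStep (acc : List (List Char) × Bool) (ln : List Char) : List (List Char) × Bool :=
  if ln = [] then (acc.1, !acc.1.isEmpty)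
  else if acc.2 then (acc.1 ++ [([] : List Char), ln], false)
  else (acc.1 ++ [ln], false)

def aStep' (acc : List (List Char) × Bool) (ln : List Char) : List (List Char) × Bool :=
  if ln = [] then ((if acc.2 then acc.1 else acc.1 ++ [([] : List Char)]), true)
  else (acc.1 ++ [ln], false)

def trimEnd (ls : List (List Char)) : List (List Char) :=
  (ls.reverse.dropWhile List.isEmpty).reverse

theorem rstrip_eq_rdropWhile (l : List Char) :
    PySem.Chars.rstrip l = List.rdropWhile PySem.Chars.isspace l := rfl

theorem rstrip_eq_nil_iff (l : List Char) :
    PySem.Chars.rstrip l = [] ↔ ∀ c ∈ l, PySem.Chars.isspace c := by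
  rw [rstrip_eq_rdropWhile]; exact List.rdropWhile_eq_nil_iff

theorem strip_eq_nil_iff (l : List Char) :
    PySem.Chars.strip l = [] ↔ ∀ c ∈ l, PySem.Chars.isspace c := by
  simp only [PySem.Chars.strip, PySem.Chars.lstrip, rstrip_eq_nil_iff]
  constructor
  · intro h c hc
    rcases List.mem_append.mp
        (by rw [List.takeWhile_append_dropWhile]; exact hc :
          c ∈ l.takeWhile PySem.Chars.isspace ++ l.dropWhile PySem.Chars.isspace) with h1 | h2
    · exact List.mem_takeWhile_imp h1
    · exact h c h2
  · intro h c hc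
    exact h c ((List.dropWhile_suffix _).subset hc)

theorem rstrip_getLast_not_space (l : List Char) (h : PySem.Chars.rstrip l ≠ []) :
    ¬ PySem.Chars.isspace ((PySem.Chars.rstrip l).getLast h) := by
  exact List.rdropWhile_last_not _ _ h

theorem space_of_beq {c : Char} (h : (c == ' ') = true) : PySem.Chars.isspace c = true := by
  rw [eq_of_beq h]; decide

theorem procLine_eq_nil_iff (raw : List Char) :
    procLine raw = [] ↔ PySem.Chars.rstrip raw = [] := by
  constructor
  · intro h
    by_contra hne
    have hall := List.dropWhile_eq_nil_iff.mp h
    have hmem := List.getLast_mem hne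
    exact rstrip_getLast_not_space raw hne (space_of_beq (hall _ hmem))
  · intro h; simp [procLine, h]

theorem getLast_procLine (raw : List Char) (h : procLine raw ≠ []) :
    ∃ h' : PySem.Chars.rstrip raw ≠ [],
      (procLine raw).getLast h = (PySem.Chars.rstrip raw).getLast h' := by
  have hsuff : procLine raw <:+ PySem.Chars.rstrip raw := List.dropWhile_suffix _
  obtain ⟨t, ht⟩ := hsuff
  have h' : PySem.Chars.rstrip raw ≠ [] := by rw [← ht]; simp [h]
  refine ⟨h', ?_⟩
  have hopt : (PySem.Chars.rstrip raw).getLast? = (procLine raw).getLast? := by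
    rw [← ht]; exact List.getLast?_append_of_ne_nil t h
  rw [List.getLast?_eq_some_getLast h', List.getLast?_eq_some_getLast h] at hopt
  exact (Option.some.inj hopt).symm

theorem strip_procLine_eq_nil_iff (raw : List Char) :
    PySem.Chars.strip (procLine raw) = [] ↔ procLine raw = [] := by
  constructor
  · intro h
    by_contra hne
    obtain ⟨h', heq⟩ := getLast_procLine raw hne
    have hall := (strip_eq_nil_iff _).mp h
    have := hall _ (List.getLast_mem hne)
    rw [heq] at this
    exact rstrip_getLast_not_space raw h' this
  · intro h; rw [h]; rfl

theorem procLine_dropWhile (raw : List Char) :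
    (procLine raw).dropWhile (fun c => c == ' ') = procLine raw :=
  List.dropWhile_idempotent _ _

theorem bStep_eq_cStep (acc : List (List Char) × Bool) (raw : List Char) :
    bStep acc raw = cStep acc (procLine raw) := by
  by_cases h : PySem.Chars.rstrip raw = []
  · have : procLine raw = [] := by simp [procLine, h]
    simp [bStep, cStep, h, this]
  · have hne : procLine raw ≠ [] := fun h0 => h ((procLine_eq_nil_iff raw).mp h0)
    have hne' : List.dropWhile (fun c => c == ' ') (PySem.Chars.rstrip raw) ≠ [] := hne
    simp only [bStep, cStep, procLine, if_neg h, if_neg hne']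

-- Q: processed lines are blank exactly when empty
def Qls (ls : List (List Char)) : Prop := ∀ l ∈ ls, (PySem.Chars.strip l = [] ↔ l = [])

theorem popLeadA_eq_dropWhile {ls : List (List Char)} (hQ : Qls ls) :
    popLeadA ls = ls.dropWhile List.isEmpty := by
  induction ls with
  | nil => rfl
  | cons l t ih =>
    have hl := hQ l (List.mem_cons_self ..)
    by_cases h0 : l = []
    · rw [popLeadA, if_pos (hl.mpr h0), ih (fun x hx => hQ x (List.mem_cons_of_mem _ hx)),
        List.dropWhile_cons, if_pos (by simp [h0])]
    · rw [popLeadA, if_neg (fun hs => h0 (hl.mp hs)), List.dropWhile_cons,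
        if_neg (by simp [h0])]

theorem popTrailA_eq (ls : List (List Char)) :
    popTrailA ls = (popLeadA ls.reverse).reverse := by
  induction ls using List.reverseRecOn with
  | nil => rw [popTrailA]; rfl
  | append_singleton xs x ih =>
    rw [popTrailA]
    have hne : xs ++ [x] ≠ [] := by simp
    rw [dif_neg hne]
    have hlast : (xs ++ [x]).getLast hne = x := List.getLast_concat
    have hrev : (xs ++ [x]).reverse = x :: xs.reverse := by simp
    rw [hlast, hrev, popLeadA]
    by_cases hs : PySem.Chars.strip x = []
    · rw [if_pos hs, if_pos hs, List.dropLast_concat, ih]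
    · rw [if_neg hs, if_neg hs]
      simp

theorem cfold_mem {ls : List (List Char)} {acc : List (List Char) × Bool} {x : List Char}
    (h : x ∈ (ls.foldl cStep acc).1) : x ∈ acc.1 ∨ x = [] ∨ x ∈ ls := by
  induction ls generalizing acc with
  | nil => exact Or.inl h
  | cons hd tl ih =>
    rcases ih (acc := cStep acc hd) h with h1 | h2 | h3
    · unfold cStep at h1
      split at h1
      · exact Or.inl h1
      · split at h1
        · rcases List.mem_append.mp h1 with h' | h'
          · exact Or.inl h'
          · rcases List.mem_cons.mp h' with h'' | h''
            · exact Or.inr (Or.inl h'')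
            · exact Or.inr (Or.inr (by
                rw [List.mem_singleton.mp h'']; exact List.mem_cons_self ..))
        · rcases List.mem_append.mp h1 with h' | h'
          · exact Or.inl h'
          · exact Or.inr (Or.inr (by simp [List.mem_singleton.mp h']))
    · exact Or.inr (Or.inl h2)
    · exact Or.inr (Or.inr (List.mem_cons_of_mem _ h3))

theorem cfold_getLast {ls : List (List Char)} {acc : List (List Char) × Bool}
    (hacc : ∀ x, acc.1.getLast? = some x → x ≠ []) :
    ∀ x, (ls.foldl cStep acc).1.getLast? = some x → x ≠ [] := by
  induction ls generalizing acc with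
  | nil => exact hacc
  | cons hd tl ih =>
    apply ih (acc := cStep acc hd)
    unfold cStep
    split
    · exact hacc
    · split
      · intro x hx
        rw [show acc.1 ++ [([] : List Char), hd] = (acc.1 ++ [([] : List Char)]) ++ [hd] by
            simp, List.getLast?_concat] at hx
        rename_i hhd _
        intro h0
        exact hhd ((Option.some.inj hx).trans h0)
      · intro x hx
        rw [List.getLast?_concat] at hx
        rename_i hhd _
        intro h0
        exact hhd ((Option.some.inj hx).trans h0)

theorem cfold_allBlank {ls : List (List Char)} (h : ∀ l ∈ ls, l = [])
    (out : List (List Char)) (p : Bool) : (ls.foldl cStep (out, p)).1 = out := by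
  induction ls generalizing p with
  | nil => rfl
  | cons hd tl ih =>
    have hhd : hd = [] := h hd (List.mem_cons_self ..)
    rw [List.foldl_cons, show cStep (out, p) hd = (out, !out.isEmpty) by simp [cStep, hhd]]
    exact ih (fun l hl => h l (List.mem_cons_of_mem _ hl)) _

theorem cfold_skip (ls : List (List Char)) :
    ls.foldl cStep ([], false) = (ls.dropWhile List.isEmpty).foldl cStep ([], false) := by
  induction ls with
  | nil => rfl
  | cons hd tl ih =>
    by_cases hhd : hd = []
    · rw [List.foldl_cons, show cStep (([] : List (List Char)), false) hd = ([], false) by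
        simp [cStep, hhd], ih, List.dropWhile_cons, if_pos (by simp [hhd])]
    · rw [List.dropWhile_cons, if_neg (by simp [hhd])]

theorem trimEnd_eq_nil_iff (ls : List (List Char)) : trimEnd ls = [] ↔ ∀ l ∈ ls, l = [] := by
  simp [trimEnd, List.dropWhile_eq_nil_iff, List.isEmpty_iff]

theorem trimEnd_cons_content {c : List Char} (hc : c ≠ []) (r : List (List Char)) :
    trimEnd (c :: r) = c :: trimEnd r := by
  unfold trimEnd
  rw [List.reverse_cons, List.dropWhile_append]
  split
  · rename_i hemp
    rw [show List.dropWhile List.isEmpty [c] = [c] by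
      rw [List.dropWhile_cons, if_neg (by simp [hc])]]
    have : List.dropWhile List.isEmpty r.reverse = [] := by simpa using hemp
    simp [this]
  · simp

theorem trimEnd_cons_blank {r : List (List Char)} (h : trimEnd r ≠ []) :
    trimEnd ([] :: r) = [] :: trimEnd r := by
  unfold trimEnd at h ⊢
  have hd : List.dropWhile List.isEmpty r.reverse ≠ [] := by simpa using h
  rw [List.reverse_cons, List.dropWhile_append]
  rw [if_neg (by simpa using hd)]
  simp

theorem trimEnd_mem {ls : List (List Char)} {x : List Char} (h : x ∈ trimEnd ls) : x ∈ ls := by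
  unfold trimEnd at h
  rw [List.mem_reverse] at h
  exact List.mem_reverse.mp ((List.dropWhile_suffix _).subset h)

-- the joint invariant of the two folds
theorem pure_main (n : Nat) : ∀ ls : List (List Char), ls.length ≤ n →
    ∀ out : List (List Char), out ≠ [] →
    (((trimEnd ls).foldl aStep' (out, false)).1 = (ls.foldl cStep (out, false)).1 ∧
     (trimEnd ls ≠ [] →
       ((trimEnd ls).foldl aStep' (out ++ [([] : List Char)], true)).1
         = (ls.foldl cStep (out, true)).1)) := by
  induction n with
  | zero =>
    intro ls hlen out hout
    rw [List.length_eq_zero_iff.mp (Nat.le_zero.mp hlen)]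
    exact ⟨rfl, fun h => absurd rfl h⟩
  | succ n ih =>
    intro ls hlen out hout
    have hemp : (!out.isEmpty) = true := by simp [hout]
    cases ls with
    | nil => exact ⟨rfl, fun h => absurd rfl h⟩
    | cons hd tl =>
      have htl : tl.length ≤ n := by simpa using hlen
      by_cases hhd : hd = []
      · subst hhd
        constructor
        · by_cases ht : trimEnd tl = []
          · have hall : ∀ l ∈ tl, l = [] := (trimEnd_eq_nil_iff tl).mp ht
            have hall' : trimEnd ([] :: tl) = [] := (trimEnd_eq_nil_iff _).mpr (by
              intro l hl
              rcases List.mem_cons.mp hl with h' | h'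
              · exact h'
              · exact hall l h')
            rw [hall', List.foldl_nil, List.foldl_cons,
              show cStep (out, false) [] = (out, !out.isEmpty) by simp [cStep], hemp]
            exact (cfold_allBlank hall out true).symm
          · rw [trimEnd_cons_blank ht, List.foldl_cons, List.foldl_cons,
              show aStep' (out, false) [] = (out ++ [[]], true) by simp [aStep'],
              show cStep (out, false) [] = (out, !out.isEmpty) by simp [cStep], hemp]
            exact (ih tl htl out hout).2 ht
        · intro hne
          have ht : trimEnd tl ≠ [] := by
            intro h0
            apply hne
            refine (trimEnd_eq_nil_iff _).mpr ?_
            intro l hl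
            rcases List.mem_cons.mp hl with h' | h'
            · exact h'
            · exact (trimEnd_eq_nil_iff tl).mp h0 l h'
          rw [trimEnd_cons_blank ht, List.foldl_cons, List.foldl_cons,
            show aStep' (out ++ [[]], true) [] = (out ++ [[]], true) by simp [aStep'],
            show cStep (out, true) [] = (out, !out.isEmpty) by simp [cStep], hemp]
          exact (ih tl htl out hout).2 ht
      · rw [trimEnd_cons_content hhd]
        constructor
        · rw [List.foldl_cons, List.foldl_cons,
            show aStep' (out, false) hd = (out ++ [hd], false) by simp [aStep', hhd],
            show cStep (out, false) hd = (out ++ [hd], false) by simp [cStep, hhd]]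
          exact (ih tl htl (out ++ [hd]) (by simp)).1
        · intro _
          rw [List.foldl_cons, List.foldl_cons,
            show aStep' (out ++ [[]], true) hd = (out ++ [[], hd], false) by
              simp [aStep', hhd],
            show cStep (out, true) hd = (out ++ [[], hd], false) by simp [cStep, hhd]]
          exact (ih tl htl (out ++ [[], hd]) (by simp)).1

theorem pure_top (ls : List (List Char)) :
    ((trimEnd (ls.dropWhile List.isEmpty)).foldl aStep' (([] : List (List Char)), false)).1
      = (ls.foldl cStep (([] : List (List Char)), false)).1 := by
  rw [cfold_skip ls]
  cases h : ls.dropWhile List.isEmpty with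
  | nil => rfl
  | cons c r =>
    have hc : c ≠ [] := by
      have hne : List.dropWhile List.isEmpty ls ≠ [] := by simp [h]
      have hh := List.head_dropWhile_not List.isEmpty (l := ls) hne
      simp only [h, List.head_cons] at hh
      simpa [List.isEmpty_iff] using hh
    rw [trimEnd_cons_content hc, List.foldl_cons, List.foldl_cons,
      show aStep' (([] : List (List Char)), false) c = ([c], false) by simp [aStep', hc],
      show cStep (([] : List (List Char)), false) c = ([c], false) by simp [cStep, hc]]
    exact (pure_main r.length r le_rfl [c] (by simp)).1

theorem minzero_aux (F : Option Int → Int → Option Int) (hF : F (some 0) 0 = some 0) :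
    ∀ xs : List Int, (∀ x ∈ xs, x = 0) → xs.foldl F (some (0 : Int)) = some 0 := by
  intro xs
  induction xs with
  | nil => intro _; rfl
  | cons a t ih =>
    intro h
    have ha : a = 0 := h a (List.mem_cons_self ..)
    subst ha
    rw [List.foldl_cons, hF]
    exact ih (fun x hx => h x (List.mem_cons_of_mem _ hx))

theorem minzero {xs : List Int} (h : ∀ x ∈ xs, x = 0) (hne : xs ≠ []) :
    PySem.List.min? xs id = some 0 := by
  cases xs with
  | nil => exact absurd rfl hne
  | cons a t =>
    have ha : a = 0 := h a (List.mem_cons_self ..)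
    subst ha
    unfold PySem.List.min?
    rw [List.foldl_cons]
    exact minzero_aux _ (by simp) t (fun x hx => h x (List.mem_cons_of_mem _ hx))

-- ===== VERDICT (by name: the statement is the Claim_ definition above) =====
theorem normalize_block_spec : Claim_equal_normalize_block := by
  intro text _
  show normalize_block text = normalize_block_alt text
  simp only [normalize_block, normalize_block_alt]
  set t := (PySem.Str.replace (PySem.Str.replace text "\t" "    ") "\x0c" "\n").toList with ht
  set raws := PySem.Chars.splitOn t ['\n'] with hraws
  set ls := raws.map procLine with hls
  have hQ : Qls ls := by
    intro l hl
    obtain ⟨raw, _, rfl⟩ := List.mem_map.mp hl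
    exact strip_procLine_eq_nil_iff raw
  -- B-side: bStep fold = cStep fold over processed lines
  have hB : raws.foldl bStep (([] : List (List Char)), false)
      = ls.foldl cStep (([] : List (List Char)), false) := by
    rw [hls, List.foldl_map]
    exact PySem.List.foldl_congr_mem _ _ _ _ (fun acc x _ => bStep_eq_cStep acc x)
  -- A-side: the two pop loops give trimEnd ∘ dropWhile
  have hQrev : Qls (ls.dropWhile List.isEmpty).reverse := by
    intro l hl
    exact hQ l ((List.dropWhile_suffix _).subset (List.mem_reverse.mp hl))
  have htrim : popTrailA (popLeadA ls) = trimEnd (ls.dropWhile List.isEmpty) := by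
    rw [popLeadA_eq_dropWhile hQ, popTrailA_eq, popLeadA_eq_dropWhile hQrev]
    rfl
  have hstep : ∀ (acc : List (List Char) × Bool) (l : List Char),
      l ∈ trimEnd (ls.dropWhile List.isEmpty) → aStep acc l = aStep' acc l := by
    intro acc l hl
    have hql := hQ l ((List.dropWhile_suffix _).subset (trimEnd_mem hl))
    unfold aStep aStep'
    by_cases h0 : l = []
    · rw [if_pos (hql.mpr h0), if_pos h0]
    · rw [if_neg (fun hs => h0 (hql.mp hs)), if_neg h0]
  have hA : ((popTrailA (popLeadA ls)).foldl aStep (([] : List (List Char)), false)).1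
      = (ls.foldl cStep (([] : List (List Char)), false)).1 := by
    rw [htrim, PySem.List.foldl_congr_mem _ _ _ _ hstep]
    exact pure_top ls
  set bout := (ls.foldl cStep (([] : List (List Char)), false)).1 with hbout
  rw [hB, hA]
  by_cases hne : bout.filter (fun ln => !(PySem.Chars.strip ln).isEmpty) = []
  · -- every produced line is blank, hence none was produced at all
    have hall : ∀ l ∈ bout, l = [] := by
      intro l hl
      have hstripl : PySem.Chars.strip l = [] := by
        have := List.filter_eq_nil_iff.mp hne l hl
        simpa [List.isEmpty_iff] using this
      rcases cfold_mem (hbout ▸ hl) with h1 | h2 | h3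
      · simp at h1
      · exact h2
      · exact (hQ l h3).mp hstripl
    have hb : bout = [] := by
      by_contra h0
      have hx := cfold_getLast (ls := ls) (acc := (([] : List (List Char)), false))
        (by intro x hx; simp at hx) (bout.getLast h0)
        (hbout ▸ List.getLast?_eq_some_getLast h0)
      exact hx (hall _ (List.getLast_mem h0))
    rw [if_pos hne]
    have hb' : (ls.foldl cStep (([] : List (List Char)), false)).1 = [] := hbout.symm.trans hb
    rw [hb']
    rfl
  · rw [if_neg hne]
    have hvals : ∀ v ∈ (bout.filter (fun ln => !(PySem.Chars.strip ln).isEmpty)).map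
        (fun ln => ((ln.length : Int) - ((ln.dropWhile (fun c => c == ' ')).length : Int))),
        v = 0 := by
      intro v hv
      obtain ⟨l, hl, rfl⟩ := List.mem_map.mp hv
      have hmem := List.mem_of_mem_filter hl
      have hstripl : PySem.Chars.strip l ≠ [] := by
        have := List.of_mem_filter hl
        simpa [List.isEmpty_iff] using this
      rcases cfold_mem (hbout ▸ hmem) with h1 | h2 | h3
      · simp at h1
      · exact absurd (show PySem.Chars.strip l = [] by subst h2; rfl) hstripl
      · obtain ⟨raw, _, rfl⟩ := List.mem_map.mp h3
        rw [procLine_dropWhile raw]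
        simp
    have hmapne : (bout.filter (fun ln => !(PySem.Chars.strip ln).isEmpty)).map
        (fun ln => ((ln.length : Int) - ((ln.dropWhile (fun c => c == ' ')).length : Int)))
        ≠ [] := by
      simpa using hne
    rw [minzero hvals hmapne]
    simp [hbout]
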